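-- pv_equiv track=rewrite | github.com/alexandraback/datacollection | solutions_5648941810974720_0/Python/eidanch/A.py | solve
-- ===== SOURCE A (Python) =====
-- dwords = ["ZERO", "ONE", "TWO", "THREE", "FOUR", "FIVE", "SIX", "SEVEN", "EIGHT", "NINE"]
--
-- def str_hist(s):
--     lst = 26*[0]
--     for c in s:
--         lst[ord(c) - ord('A')] += 1
--     return lst
--
-- def solve(s):
--     hist = str_hist(s)
--     counts = 10*[0]
--     alg = [(0,'Z'), (2,'W'), (4,'U'), (3,'R'), (1,'O'), (5,'F'),
--            (6,'X'), (7, 'V'), (8, 'G'), (9, 'I')]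
--     for d, c in alg:
--         counts[d] = hist[ord(c) - ord('A')]
--         for cc in dwords[d]:
--             hist[ord(cc) - ord('A')] -= counts[d]
--     s = ""
--     for d in range(10):
--         s += counts[d]*str(d)
--     return s
-- ===== SOURCE B (Python) =====
-- dwords = ["ZERO", "ONE", "TWO", "THREE", "FOUR", "FIVE", "SIX", "SEVEN", "EIGHT", "NINE"]
--
-- def str_hist(s):
--     lst = 26*[0]
--     for c in s:
--         lst[ord(c) - ord('A')] += 1
--     return lst
--
-- def solve(s):
--     h = str_hist(s)
--     def g(c):
--         return h[ord(c) - ord('A')]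
--     zero = g('Z'); two = g('W'); four = g('U'); six = g('X'); eight = g('G')
--     one = g('O') - zero - two - four
--     three = g('R') - zero - four
--     five = g('F') - four
--     seven = g('V') - five
--     nine = g('I') - five - six - eight
--     counts = [zero, one, two, three, four, five, six, seven, eight, nine]
--     return "".join(counts[d] * str(d) for d in range(10))
-- ===== Notes on version B (the rewrite author's own statement) =====
-- stated objective: simpler
-- what changed: B replaces A's mutating nested per-word subtraction loop over the alg table with ten closed-form arithmetic expressions read off one immutable histogram, and builds the result with a single join instead of string accumulation.
import Mathlib
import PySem

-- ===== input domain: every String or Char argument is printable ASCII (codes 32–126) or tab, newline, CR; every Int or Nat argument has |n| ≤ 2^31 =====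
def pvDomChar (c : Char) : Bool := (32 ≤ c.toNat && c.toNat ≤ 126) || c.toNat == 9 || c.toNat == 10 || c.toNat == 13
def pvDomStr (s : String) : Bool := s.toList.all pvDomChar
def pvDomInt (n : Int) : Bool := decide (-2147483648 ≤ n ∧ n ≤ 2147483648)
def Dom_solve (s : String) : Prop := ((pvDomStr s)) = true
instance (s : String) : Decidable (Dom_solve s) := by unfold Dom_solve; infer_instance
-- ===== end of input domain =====

-- B computes the ten digit counts in closed form from one immutable histogram (no mutating
-- nested subtraction loop) and joins the pieces; objective: simpler.

-- ===== PORT A =====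

-- n * str  (Python string repetition; exact: negative n gives "")
def pyStrMul (n : Int) (t : String) : String := String.join (List.replicate n.toNat t)

def dwordsA : List String := ["ZERO", "ONE", "TWO", "THREE", "FOUR", "FIVE", "SIX", "SEVEN", "EIGHT", "NINE"]

-- lst[ord(c)-ord('A')] += 1  (pyGetD/pySetD are exact under Pre_solve: every index is in Python range)
def strHistA (s : String) : List Int :=
  s.toList.foldl
    (fun lst c =>
      PySem.List.pySetD lst ((c.toNat : Int) - 65)
        (PySem.List.pyGetD lst ((c.toNat : Int) - 65) 0 + 1))
    (List.replicate 26 (0 : Int))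

def algA : List (Int × Char) :=
  [(0,'Z'), (2,'W'), (4,'U'), (3,'R'), (1,'O'), (5,'F'), (6,'X'), (7,'V'), (8,'G'), (9,'I')]

-- one iteration of "for d, c in alg", state = (hist, counts)
def stepA (st : List Int × List Int) (p : Int × Char) : List Int × List Int :=
  let v := PySem.List.pyGetD st.1 ((p.2.toNat : Int) - 65) 0
  let counts' := PySem.List.pySetD st.2 p.1 v
  let hist' :=
    (PySem.List.pyGetD dwordsA p.1 "").toList.foldl
      (fun h cc =>
        PySem.List.pySetD h ((cc.toNat : Int) - 65)
          (PySem.List.pyGetD h ((cc.toNat : Int) - 65) 0 - v))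
      st.1
  (hist', counts')

-- solve after str_hist, as a function of the histogram
def coreA (hist : List Int) : String :=
  let st := algA.foldl stepA (hist, List.replicate 10 (0 : Int))
  (PySem.List.pyRange 0 10 1).foldl
    (fun acc d => acc ++ pyStrMul (PySem.List.pyGetD st.2 d 0) (PySem.Int.toStr d)) ""

def solve (s : String) : String := coreA (strHistA s)

-- ===== PORT B =====

-- str_hist, kept unchanged in B (same body as A's)
def strHistB (s : String) : List Int :=
  s.toList.foldl
    (fun lst c =>
      PySem.List.pySetD lst ((c.toNat : Int) - 65)
        (PySem.List.pyGetD lst ((c.toNat : Int) - 65) 0 + 1))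
    (List.replicate 26 (0 : Int))

def coreB (h : List Int) : String :=
  let g := fun (c : Char) => PySem.List.pyGetD h ((c.toNat : Int) - 65) 0
  let zero := g 'Z'
  let two := g 'W'
  let four := g 'U'
  let six := g 'X'
  let eight := g 'G'
  let one := g 'O' - zero - two - four
  let three := g 'R' - zero - four
  let five := g 'F' - four
  let seven := g 'V' - five
  let nine := g 'I' - five - six - eight
  let counts : List Int := [zero, one, two, three, four, five, six, seven, eight, nine]
  String.join ((PySem.List.pyRange 0 10 1).map
    (fun d => pyStrMul (PySem.List.pyGetD counts d 0) (PySem.Int.toStr d)))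

def solve_alt (s : String) : String := coreB (strHistB s)

-- ===== PRECONDITION & SPEC =====
-- Pre_ excludes exactly the strings containing a character with code < 39 or > 90, on which
-- Python A (and B) raises IndexError in str_hist (ord(c)-ord('A') outside [-26, 25]).
def Pre_solve (s : String) : Prop :=
  (s.toList.all (fun c => 39 ≤ c.toNat && c.toNat ≤ 90)) = true
instance (s : String) : Decidable (Pre_solve s) := by unfold Pre_solve; infer_instance

def pvWitness_solve : String := "ONEZTWO"

def Spec_solve (s : String) (out : String) : Prop := out = solve_alt s
instance (s : String) (out : String) : Decidable (Spec_solve s out) := by unfold Spec_solve; infer_instance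

-- ===== CLAIM (what is proved, stated in full; the proofs are below) =====
def Claim_equal_solve : Prop := ∀ (s : String), Dom_solve s → Pre_solve s → Spec_solve s (solve s)

-- ===== LEMMAS AND PROOFS =====

theorem strHist_eq (s : String) : strHistA s = strHistB s := rfl

theorem histFold_length (cs : List Char) (lst : List Int) :
    (cs.foldl
      (fun lst c =>
        PySem.List.pySetD lst ((c.toNat : Int) - 65)
          (PySem.List.pyGetD lst ((c.toNat : Int) - 65) 0 + 1)) lst).length = lst.length := by
  induction cs generalizing lst with
  | nil => rfl
  | cons c cs ih => simp [ih, PySem.List.length_pySetD]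

theorem strHistA_length (s : String) : (strHistA s).length = 26 := by
  unfold strHistA
  simp [histFold_length]

set_option maxHeartbeats 2000000 in
set_option maxRecDepth 8192 in
theorem core_eq (h : List Int) (hl : h.length = 26) : coreA h = coreB h := by
  obtain ⟨a0,a1,a2,a3,a4,a5,a6,a7,a8,a9,a10,a11,a12,a13,a14,a15,a16,a17,a18,a19,a20,a21,a22,a23,a24,a25,rfl⟩ :
      ∃ a0 a1 a2 a3 a4 a5 a6 a7 a8 a9 a10 a11 a12 a13 a14 a15 a16 a17 a18 a19 a20 a21 a22 a23 a24 a25, h = [a0,a1,a2,a3,a4,a5,a6,a7,a8,a9,a10,a11,a12,a13,a14,a15,a16,a17,a18,a19,a20,a21,a22,a23,a24,a25] := by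
    match h, hl with
    | [a0,a1,a2,a3,a4,a5,a6,a7,a8,a9,a10,a11,a12,a13,a14,a15,a16,a17,a18,a19,a20,a21,a22,a23,a24,a25], _ => exact ⟨a0,a1,a2,a3,a4,a5,a6,a7,a8,a9,a10,a11,a12,a13,a14,a15,a16,a17,a18,a19,a20,a21,a22,a23,a24,a25, rfl⟩
  simp only [coreA, algA, List.foldl_cons, List.foldl_nil]
  have s0 : stepA ([a0, a1, a2, a3, a4, a5, a6, a7, a8, a9, a10, a11, a12, a13, a14, a15, a16, a17, a18, a19, a20, a21, a22, a23, a24, a25], List.replicate 10 (0:Int)) ((0 : Int),'Z') = ([a0, a1, a2, a3, (a4 - (a25)), a5, a6, a7, a8, a9, a10, a11, a12, a13, (a14 - (a25)), a15, a16, (a17 - (a25)), a18, a19, a20, a21, a22, a23, a24, (a25 - (a25))], [a25, (0:Int), (0:Int), (0:Int), (0:Int), (0:Int), (0:Int), (0:Int), (0:Int), (0:Int)]) := rfl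
  have s1 : stepA ([a0, a1, a2, a3, (a4 - (a25)), a5, a6, a7, a8, a9, a10, a11, a12, a13, (a14 - (a25)), a15, a16, (a17 - (a25)), a18, a19, a20, a21, a22, a23, a24, (a25 - (a25))], [a25, (0:Int), (0:Int), (0:Int), (0:Int), (0:Int), (0:Int), (0:Int), (0:Int), (0:Int)]) ((2 : Int),'W') = ([a0, a1, a2, a3, (a4 - (a25)), a5, a6, a7, a8, a9, a10, a11, a12, a13, ((a14 - (a25)) - (a22)), a15, a16, (a17 - (a25)), a18, (a19 - (a22)), a20, a21, (a22 - (a22)), a23, a24, (a25 - (a25))], [a25, (0:Int), a22, (0:Int), (0:Int), (0:Int), (0:Int), (0:Int), (0:Int), (0:Int)]) := rfl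
  have s2 : stepA ([a0, a1, a2, a3, (a4 - (a25)), a5, a6, a7, a8, a9, a10, a11, a12, a13, ((a14 - (a25)) - (a22)), a15, a16, (a17 - (a25)), a18, (a19 - (a22)), a20, a21, (a22 - (a22)), a23, a24, (a25 - (a25))], [a25, (0:Int), a22, (0:Int), (0:Int), (0:Int), (0:Int), (0:Int), (0:Int), (0:Int)]) ((4 : Int),'U') = ([a0, a1, a2, a3, (a4 - (a25)), (a5 - (a20)), a6, a7, a8, a9, a10, a11, a12, a13, (((a14 - (a25)) - (a22)) - (a20)), a15, a16, ((a17 - (a25)) - (a20)), a18, (a19 - (a22)), (a20 - (a20)), a21, (a22 - (a22)), a23, a24, (a25 - (a25))], [a25, (0:Int), a22, (0:Int), a20, (0:Int), (0:Int), (0:Int), (0:Int), (0:Int)]) := rfl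
  have s3 : stepA ([a0, a1, a2, a3, (a4 - (a25)), (a5 - (a20)), a6, a7, a8, a9, a10, a11, a12, a13, (((a14 - (a25)) - (a22)) - (a20)), a15, a16, ((a17 - (a25)) - (a20)), a18, (a19 - (a22)), (a20 - (a20)), a21, (a22 - (a22)), a23, a24, (a25 - (a25))], [a25, (0:Int), a22, (0:Int), a20, (0:Int), (0:Int), (0:Int), (0:Int), (0:Int)]) ((3 : Int),'R') = ([a0, a1, a2, a3, (((a4 - (a25)) - (((a17 - (a25)) - (a20)))) - (((a17 - (a25)) - (a20)))), (a5 - (a20)), a6, (a7 - (((a17 - (a25)) - (a20)))), a8, a9, a10, a11, a12, a13, (((a14 - (a25)) - (a22)) - (a20)), a15, a16, (((a17 - (a25)) - (a20)) - (((a17 - (a25)) - (a20)))), a18, ((a19 - (a22)) - (((a17 - (a25)) - (a20)))), (a20 - (a20)), a21, (a22 - (a22)), a23, a24, (a25 - (a25))], [a25, (0:Int), a22, ((a17 - (a25)) - (a20)), a20, (0:Int), (0:Int), (0:Int), (0:Int), (0:Int)]) := rfl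
  have s4 : stepA ([a0, a1, a2, a3, (((a4 - (a25)) - (((a17 - (a25)) - (a20)))) - (((a17 - (a25)) - (a20)))), (a5 - (a20)), a6, (a7 - (((a17 - (a25)) - (a20)))), a8, a9, a10, a11, a12, a13, (((a14 - (a25)) - (a22)) - (a20)), a15, a16, (((a17 - (a25)) - (a20)) - (((a17 - (a25)) - (a20)))), a18, ((a19 - (a22)) - (((a17 - (a25)) - (a20)))), (a20 - (a20)), a21, (a22 - (a22)), a23, a24, (a25 - (a25))], [a25, (0:Int), a22, ((a17 - (a25)) - (a20)), a20, (0:Int), (0:Int), (0:Int), (0:Int), (0:Int)]) ((1 : Int),'O') = ([a0, a1, a2, a3, ((((a4 - (a25)) - (((a17 - (a25)) - (a20)))) - (((a17 - (a25)) - (a20)))) - ((((a14 - (a25)) - (a22)) - (a20)))), (a5 - (a20)), a6, (a7 - (((a17 - (a25)) - (a20)))), a8, a9, a10, a11, a12, (a13 - ((((a14 - (a25)) - (a22)) - (a20)))), ((((a14 - (a25)) - (a22)) - (a20)) - ((((a14 - (a25)) - (a22)) - (a20)))), a15, a16, (((a17 - (a25)) - (a20)) - (((a17 - (a25)) - (a20)))),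 a18, ((a19 - (a22)) - (((a17 - (a25)) - (a20)))), (a20 - (a20)), a21, (a22 - (a22)), a23, a24, (a25 - (a25))], [a25, (((a14 - (a25)) - (a22)) - (a20)), a22, ((a17 - (a25)) - (a20)), a20, (0:Int), (0:Int), (0:Int), (0:Int), (0:Int)]) := rfl
  have s5 : stepA ([a0, a1, a2, a3, ((((a4 - (a25)) - (((a17 - (a25)) - (a20)))) - (((a17 - (a25)) - (a20)))) - ((((a14 - (a25)) - (a22)) - (a20)))), (a5 - (a20)), a6, (a7 - (((a17 - (a25)) - (a20)))), a8, a9, a10, a11, a12, (a13 - ((((a14 - (a25)) - (a22)) - (a20)))), ((((a14 - (a25)) - (a22)) - (a20)) - ((((a14 - (a25)) - (a22)) - (a20)))), a15, a16, (((a17 - (a25)) - (a20)) - (((a17 - (a25)) - (a20)))), a18, ((a19 - (a22)) - (((a17 - (a25)) - (a20)))), (a20 - (a20)), a21, (a22 - (a22)), a23, a24, (a25 - (a25))], [a25, (((a14 - (a25)) - (a22)) - (a20)), a22, ((a17 - (a25)) - (a20)), a20, (0:Int), (0:Int), (0:Int), (0:Int), (0:Int)]) ((5 : Int),'F') = ([a0,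 a1, a2, a3, (((((a4 - (a25)) - (((a17 - (a25)) - (a20)))) - (((a17 - (a25)) - (a20)))) - ((((a14 - (a25)) - (a22)) - (a20)))) - ((a5 - (a20)))), ((a5 - (a20)) - ((a5 - (a20)))), a6, (a7 - (((a17 - (a25)) - (a20)))), (a8 - ((a5 - (a20)))), a9, a10, a11, a12, (a13 - ((((a14 - (a25)) - (a22)) - (a20)))), ((((a14 - (a25)) - (a22)) - (a20)) - ((((a14 - (a25)) - (a22)) - (a20)))), a15, a16, (((a17 - (a25)) - (a20)) - (((a17 - (a25)) - (a20)))), a18, ((a19 - (a22)) - (((a17 - (a25)) - (a20)))), (a20 - (a20)), (a21 - ((a5 - (a20)))), (a22 - (a22)), a23, a24, (a25 - (a25))], [a25, (((a14 - (a25)) - (a22)) - (a20)), a22, ((a17 - (a25)) - (a20)), a20, (a5 - (a20)), (0:Int), (0:Int), (0:Int), (0:Int)]) := rfl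
  have s6 : stepA ([a0, a1, a2, a3, (((((a4 - (a25)) - (((a17 - (a25)) - (a20)))) - (((a17 - (a25)) - (a20)))) - ((((a14 - (a25)) - (a22)) - (a20)))) - ((a5 - (a20)))), ((a5 - (a20)) - ((a5 - (a20)))), a6, (a7 - (((a17 - (a25)) - (a20)))), (a8 - ((a5 - (a20)))), a9, a10, a11, a12, (a13 - ((((a14 - (a25)) - (a22)) - (a20)))), ((((a14 - (a25)) - (a22)) - (a20)) - ((((a14 - (a25)) - (a22)) - (a20)))), a15, a16, (((a17 - (a25)) - (a20)) - (((a17 - (a25)) - (a20)))), a18, ((a19 - (a22)) - (((a17 - (a25)) - (a20)))), (a20 - (a20)), (a21 - ((a5 - (a20)))), (a22 - (a22)), a23, a24, (a25 - (a25))], [a25, (((a14 - (a25)) - (a22)) - (a20)), a22, ((a17 - (a25)) - (a20)), a20, (a5 - (a20)), (0:Int), (0:Int), (0:Int), (0:Int)]) ((6 : Int),'X') = ([a0, a1, a2, a3, (((((a4 - (a25)) - (((a17 - (a25)) - (a20)))) - (((a17 - (a25)) - (a20)))) - ((((a14 - (a25)) - (a22)) - (a20)))) - ((a5 - (a20)))),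 ((a5 - (a20)) - ((a5 - (a20)))), a6, (a7 - (((a17 - (a25)) - (a20)))), ((a8 - ((a5 - (a20)))) - (a23)), a9, a10, a11, a12, (a13 - ((((a14 - (a25)) - (a22)) - (a20)))), ((((a14 - (a25)) - (a22)) - (a20)) - ((((a14 - (a25)) - (a22)) - (a20)))), a15, a16, (((a17 - (a25)) - (a20)) - (((a17 - (a25)) - (a20)))), (a18 - (a23)), ((a19 - (a22)) - (((a17 - (a25)) - (a20)))), (a20 - (a20)), (a21 - ((a5 - (a20)))), (a22 - (a22)), (a23 - (a23)), a24, (a25 - (a25))], [a25, (((a14 - (a25)) - (a22)) - (a20)), a22, ((a17 - (a25)) - (a20)), a20, (a5 - (a20)), a23, (0:Int), (0:Int), (0:Int)]) := rfl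
  have s7 : stepA ([a0, a1, a2, a3, (((((a4 - (a25)) - (((a17 - (a25)) - (a20)))) - (((a17 - (a25)) - (a20)))) - ((((a14 - (a25)) - (a22)) - (a20)))) - ((a5 - (a20)))), ((a5 - (a20)) - ((a5 - (a20)))), a6, (a7 - (((a17 - (a25)) - (a20)))), ((a8 - ((a5 - (a20)))) - (a23)), a9, a10, a11, a12, (a13 - ((((a14 - (a25)) - (a22)) - (a20)))), ((((a14 - (a25)) - (a22)) - (a20)) - ((((a14 - (a25)) - (a22)) - (a20)))), a15, a16, (((a17 - (a25)) - (a20)) - (((a17 - (a25)) - (a20)))), (a18 - (a23)), ((a19 - (a22)) - (((a17 - (a25)) - (a20)))), (a20 - (a20)), (a21 - ((a5 - (a20)))), (a22 - (a22)), (a23 - (a23)), a24, (a25 - (a25))], [a25, (((a14 - (a25)) - (a22)) - (a20)), a22, ((a17 - (a25)) - (a20)), a20, (a5 - (a20)), a23, (0:Int), (0:Int), (0:Int)]) ((7 : Int),'V') = ([a0, a1, a2, a3, (((((((a4 - (a25)) - (((a17 - (a25)) - (a20)))) - (((a17 - (a25)) - (a20)))) - ((((a14 - (a25)) - (a22)) -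 (a20)))) - ((a5 - (a20)))) - ((a21 - ((a5 - (a20)))))) - ((a21 - ((a5 - (a20)))))), ((a5 - (a20)) - ((a5 - (a20)))), a6, (a7 - (((a17 - (a25)) - (a20)))), ((a8 - ((a5 - (a20)))) - (a23)), a9, a10, a11, a12, ((a13 - ((((a14 - (a25)) - (a22)) - (a20)))) - ((a21 - ((a5 - (a20)))))), ((((a14 - (a25)) - (a22)) - (a20)) - ((((a14 - (a25)) - (a22)) - (a20)))), a15, a16, (((a17 - (a25)) - (a20)) - (((a17 - (a25)) - (a20)))), ((a18 - (a23)) - ((a21 - ((a5 - (a20)))))), ((a19 - (a22)) - (((a17 - (a25)) - (a20)))), (a20 - (a20)), ((a21 - ((a5 - (a20)))) - ((a21 - ((a5 - (a20)))))), (a22 - (a22)), (a23 - (a23)), a24, (a25 - (a25))], [a25, (((a14 - (a25)) - (a22)) - (a20)), a22, ((a17 - (a25)) - (a20)), a20, (a5 - (a20)), a23, (a21 - ((a5 - (a20)))), (0:Int), (0:Int)]) := rfl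
  have s8 : stepA ([a0, a1, a2, a3, (((((((a4 - (a25)) - (((a17 - (a25)) - (a20)))) - (((a17 - (a25)) - (a20)))) - ((((a14 - (a25)) - (a22)) - (a20)))) - ((a5 - (a20)))) - ((a21 - ((a5 - (a20)))))) - ((a21 - ((a5 - (a20)))))), ((a5 - (a20)) - ((a5 - (a20)))), a6, (a7 - (((a17 - (a25)) - (a20)))), ((a8 - ((a5 - (a20)))) - (a23)), a9, a10, a11, a12, ((a13 - ((((a14 - (a25)) - (a22)) - (a20)))) - ((a21 - ((a5 - (a20)))))), ((((a14 - (a25)) - (a22)) - (a20)) - ((((a14 - (a25)) - (a22)) - (a20)))), a15, a16, (((a17 - (a25)) - (a20)) - (((a17 - (a25)) - (a20)))), ((a18 - (a23)) - ((a21 - ((a5 - (a20)))))), ((a19 - (a22)) - (((a17 - (a25)) - (a20)))), (a20 - (a20)), ((a21 - ((a5 - (a20)))) - ((a21 - ((a5 - (a20)))))), (a22 - (a22)), (a23 - (a23)), a24, (a25 - (a25))], [a25, (((a14 - (a25)) - (a22)) - (a20)), a22, ((a17 - (a25)) - (a20)), a20, (a5 - (a20)), a23, (a21 - ((a5 - (a20)))),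 (0:Int), (0:Int)]) ((8 : Int),'G') = ([a0, a1, a2, a3, ((((((((a4 - (a25)) - (((a17 - (a25)) - (a20)))) - (((a17 - (a25)) - (a20)))) - ((((a14 - (a25)) - (a22)) - (a20)))) - ((a5 - (a20)))) - ((a21 - ((a5 - (a20)))))) - ((a21 - ((a5 - (a20)))))) - (a6)), ((a5 - (a20)) - ((a5 - (a20)))), (a6 - (a6)), ((a7 - (((a17 - (a25)) - (a20)))) - (a6)), (((a8 - ((a5 - (a20)))) - (a23)) - (a6)), a9, a10, a11, a12, ((a13 - ((((a14 - (a25)) - (a22)) - (a20)))) - ((a21 - ((a5 - (a20)))))), ((((a14 - (a25)) - (a22)) - (a20)) - ((((a14 - (a25)) - (a22)) - (a20)))), a15, a16, (((a17 - (a25)) - (a20)) - (((a17 - (a25)) - (a20)))), ((a18 - (a23)) - ((a21 - ((a5 - (a20)))))), (((a19 - (a22)) - (((a17 - (a25)) - (a20)))) - (a6)), (a20 - (a20)), ((a21 - ((a5 - (a20)))) - ((a21 - ((a5 - (a20)))))), (a22 - (a22)), (a23 - (a23)), a24, (a25 - (a25))], [a25, (((a14 - (a25)) - (a22)) - (a20)),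 a22, ((a17 - (a25)) - (a20)), a20, (a5 - (a20)), a23, (a21 - ((a5 - (a20)))), a6, (0:Int)]) := rfl
  have s9 : stepA ([a0, a1, a2, a3, ((((((((a4 - (a25)) - (((a17 - (a25)) - (a20)))) - (((a17 - (a25)) - (a20)))) - ((((a14 - (a25)) - (a22)) - (a20)))) - ((a5 - (a20)))) - ((a21 - ((a5 - (a20)))))) - ((a21 - ((a5 - (a20)))))) - (a6)), ((a5 - (a20)) - ((a5 - (a20)))), (a6 - (a6)), ((a7 - (((a17 - (a25)) - (a20)))) - (a6)), (((a8 - ((a5 - (a20)))) - (a23)) - (a6)), a9, a10, a11, a12, ((a13 - ((((a14 - (a25)) - (a22)) - (a20)))) - ((a21 - ((a5 - (a20)))))), ((((a14 - (a25)) - (a22)) - (a20)) - ((((a14 - (a25)) - (a22)) - (a20)))), a15, a16, (((a17 - (a25)) - (a20)) - (((a17 - (a25)) - (a20)))), ((a18 - (a23)) - ((a21 - ((a5 - (a20)))))), (((a19 - (a22)) - (((a17 - (a25)) - (a20)))) - (a6)), (a20 - (a20)), ((a21 - ((a5 - (a20)))) - ((a21 - ((a5 - (a20)))))), (a22 - (a22)),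 (a23 - (a23)), a24, (a25 - (a25))], [a25, (((a14 - (a25)) - (a22)) - (a20)), a22, ((a17 - (a25)) - (a20)), a20, (a5 - (a20)), a23, (a21 - ((a5 - (a20)))), a6, (0:Int)]) ((9 : Int),'I') = ([a0, a1, a2, a3, (((((((((a4 - (a25)) - (((a17 - (a25)) - (a20)))) - (((a17 - (a25)) - (a20)))) - ((((a14 - (a25)) - (a22)) - (a20)))) - ((a5 - (a20)))) - ((a21 - ((a5 - (a20)))))) - ((a21 - ((a5 - (a20)))))) - (a6)) - ((((a8 - ((a5 - (a20)))) - (a23)) - (a6)))), ((a5 - (a20)) - ((a5 - (a20)))), (a6 - (a6)), ((a7 - (((a17 - (a25)) - (a20)))) - (a6)), ((((a8 - ((a5 - (a20)))) - (a23)) - (a6)) - ((((a8 - ((a5 - (a20)))) - (a23)) - (a6)))), a9, a10, a11, a12, ((((a13 - ((((a14 - (a25)) - (a22)) - (a20)))) - ((a21 - ((a5 - (a20)))))) - ((((a8 - ((a5 - (a20)))) - (a23)) - (a6)))) - ((((a8 - ((a5 - (a20)))) - (a23)) - (a6)))), ((((a14 - (a25)) - (a22)) - (a20)) - ((((a14 -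 (a25)) - (a22)) - (a20)))), a15, a16, (((a17 - (a25)) - (a20)) - (((a17 - (a25)) - (a20)))), ((a18 - (a23)) - ((a21 - ((a5 - (a20)))))), (((a19 - (a22)) - (((a17 - (a25)) - (a20)))) - (a6)), (a20 - (a20)), ((a21 - ((a5 - (a20)))) - ((a21 - ((a5 - (a20)))))), (a22 - (a22)), (a23 - (a23)), a24, (a25 - (a25))], [a25, (((a14 - (a25)) - (a22)) - (a20)), a22, ((a17 - (a25)) - (a20)), a20, (a5 - (a20)), a23, (a21 - ((a5 - (a20)))), a6, (((a8 - ((a5 - (a20)))) - (a23)) - (a6))]) := rfl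
  rw [s0, s1, s2, s3, s4, s5, s6, s7, s8, s9]
  rfl
-- ===== VERDICT (by name: the statement is the Claim_ definition above) =====
theorem solve_spec : Claim_equal_solve := by
  intro s _ _
  unfold Spec_solve solve solve_alt
  rw [← strHist_eq]
  exact core_eq _ (strHistA_length s)
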